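-- pv_equiv track=rewrite | github.com/stevolopolis/asmr | my_profiler.py | mlp_profiler
-- ===== SOURCE A (Python) =====
-- def mlp_profiler(n_layers, dim_in, hidden_dims, dim_out):
--     assert n_layers == len(hidden_dims) + 1
--
--     MAC = 0
--     # MAC of backbone model
--     for i in range(n_layers):
--         # MAC of layer
--         if i == 0:
--             module_MAC = dim_in * hidden_dims[0] + hidden_dims[0]
--         elif i == n_layers - 1:
--             module_MAC = hidden_dims[i-1] * dim_out + dim_out
--         else:
--             module_MAC = hidden_dims[i-1] * hidden_dims[i] + hidden_dims[i]
--         MAC += module_MAC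
--
--     return MAC
-- ===== SOURCE B (Python) =====
-- def mlp_profiler(n_layers, dim_in, hidden_dims, dim_out):
--     assert n_layers == len(hidden_dims) + 1
--     h0 = hidden_dims[0]
--     first = dim_in * h0 + h0
--     if len(hidden_dims) == 1:
--         return first + h0 * dim_out + dim_out
--     return first + mlp_profiler(n_layers - 1, h0, hidden_dims[1:], dim_out)
-- ===== Notes on version B (the rewrite author's own statement) =====
-- stated objective: alternative
-- what changed: Replaces A's indexed loop with a positional three-way branch by structural recursion on the hidden-dimension list: peel off the first layer's cost (dim_in*h0 + h0) and recurse on the remaining smaller MLP, with a one-hidden-layer base case that also accounts for the output layer.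
import Mathlib
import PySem

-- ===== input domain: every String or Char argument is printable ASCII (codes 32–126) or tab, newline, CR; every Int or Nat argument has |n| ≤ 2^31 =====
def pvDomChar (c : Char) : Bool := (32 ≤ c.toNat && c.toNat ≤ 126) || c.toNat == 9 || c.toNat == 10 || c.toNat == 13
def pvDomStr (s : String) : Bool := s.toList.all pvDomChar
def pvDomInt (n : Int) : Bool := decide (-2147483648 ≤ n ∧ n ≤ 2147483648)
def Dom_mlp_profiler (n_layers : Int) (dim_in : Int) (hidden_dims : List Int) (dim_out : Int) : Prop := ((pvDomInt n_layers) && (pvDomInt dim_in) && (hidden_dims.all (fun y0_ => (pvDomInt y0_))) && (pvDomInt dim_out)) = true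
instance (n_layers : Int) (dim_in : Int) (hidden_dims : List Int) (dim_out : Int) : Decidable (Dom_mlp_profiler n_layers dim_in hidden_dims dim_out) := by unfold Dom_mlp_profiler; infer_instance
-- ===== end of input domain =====

-- B computes the MAC count by structural recursion on the hidden-dimension list
-- (peel the first layer, recurse on the smaller MLP) instead of A's indexed loop
-- with a positional three-way branch (alternative decomposition, same cost).


-- ===== PORT A =====
-- the loop body of A: module_MAC for layer i, added to MAC (hidden_dims[j] ported as
-- pyGetD …, exact on Pre_ where every index Python touches is in range)
def abody (hidden_dims : List Int) (n_layers dim_in dim_out : Int) (MAC i : Int) : Int :=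
  let module_MAC :=
    if i = 0 then
      dim_in * PySem.List.pyGetD hidden_dims 0 0 + PySem.List.pyGetD hidden_dims 0 0
    else if i = n_layers - 1 then
      PySem.List.pyGetD hidden_dims (i - 1) 0 * dim_out + dim_out
    else
      PySem.List.pyGetD hidden_dims (i - 1) 0 * PySem.List.pyGetD hidden_dims i 0
        + PySem.List.pyGetD hidden_dims i 0
  MAC + module_MAC

def mlp_profiler (n_layers : Int) (dim_in : Int) (hidden_dims : List Int) (dim_out : Int) : Int :=
  (PySem.List.pyRange 0 n_layers 1).foldl (abody hidden_dims n_layers dim_in dim_out) 0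

-- ===== PORT B =====
-- structural recursion of Source B; the [] case is unreachable under Pre_ (Python B
-- raises IndexError there, just like A)
def mlp_profiler_alt (n_layers : Int) (dim_in : Int) (hidden_dims : List Int) (dim_out : Int) : Int :=
  match hidden_dims with
  | [] => 0
  | [h0] => dim_in * h0 + h0 + (h0 * dim_out + dim_out)
  | h0 :: rest => dim_in * h0 + h0 + mlp_profiler_alt (n_layers - 1) h0 rest dim_out

-- ===== PRECONDITION & SPEC =====
-- Pre_ excludes exactly the inputs where A raises: AssertionError when
-- n_layers ≠ len(hidden_dims)+1, and IndexError on hidden_dims[0] when hidden_dims = [].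
def Pre_mlp_profiler (n_layers : Int) (dim_in : Int) (hidden_dims : List Int) (dim_out : Int) : Prop :=
  n_layers = hidden_dims.length + 1 ∧ hidden_dims ≠ []
instance (n_layers : Int) (dim_in : Int) (hidden_dims : List Int) (dim_out : Int) : Decidable (Pre_mlp_profiler n_layers dim_in hidden_dims dim_out) := by unfold Pre_mlp_profiler; infer_instance

def pvWitness_mlp_profiler : Int × Int × List Int × Int := (3, 2, [5, 7], 4)

def Spec_mlp_profiler (n_layers : Int) (dim_in : Int) (hidden_dims : List Int) (dim_out : Int) (out : Int) : Prop := out = mlp_profiler_alt n_layers dim_in hidden_dims dim_out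
instance (n_layers : Int) (dim_in : Int) (hidden_dims : List Int) (dim_out : Int) (out : Int) : Decidable (Spec_mlp_profiler n_layers dim_in hidden_dims dim_out out) := by unfold Spec_mlp_profiler; infer_instance

-- ===== CLAIM (what is proved, stated in full; the proofs are below) =====
def Claim_equal_mlp_profiler : Prop := ∀ (n_layers : Int) (dim_in : Int) (hidden_dims : List Int) (dim_out : Int), Dom_mlp_profiler n_layers dim_in hidden_dims dim_out → Pre_mlp_profiler n_layers dim_in hidden_dims dim_out → Spec_mlp_profiler n_layers dim_in hidden_dims dim_out (mlp_profiler n_layers dim_in hidden_dims dim_out)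

-- ===== LEMMAS AND PROOFS =====
-- common characterisation both ports are reduced to: sum of a*b + b over adjacent pairs
def zs (l : List Int) : Int := ((l.zip l.tail).map (fun p => p.1 * p.2 + p.2)).sum

theorem zs_cons (a b : Int) (r : List Int) : zs (a :: b :: r) = a * b + b + zs (b :: r) := by
  simp [zs, List.zip]

-- B's recursion computes zs of the flattened dimension sequence
theorem alt_eq_zs (t : List Int) : ∀ (n h din dout : Int),
    mlp_profiler_alt n din (h :: t) dout = zs (din :: h :: (t ++ [dout])) := by
  induction t with
  | nil =>
    intro n h din dout
    simp [mlp_profiler_alt, zs, List.zip]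
  | cons x t' ih =>
    intro n h din dout
    rw [show mlp_profiler_alt n din (h :: x :: t') dout
          = din * h + h + mlp_profiler_alt (n - 1) h (x :: t') dout from rfl,
        ih (n - 1) x h dout]
    simp only [List.cons_append, zs_cons]

-- index shift: A's body on the cons'ed list at index 1+k equals the body on the tail at index k
theorem pyGetD_cons_shift (y d : Int) (l : List Int) (i : Int) (hi : 0 ≤ i) :
    PySem.List.pyGetD (y :: l) (i + 1) d = PySem.List.pyGetD l i d := by
  obtain ⟨k, rfl⟩ : ∃ k : Nat, i = (k : Int) := ⟨i.toNat, (Int.toNat_of_nonneg hi).symm⟩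
  rw [show ((k : Int) + 1) = ((k + 1 : Nat) : Int) by omega,
      PySem.List.pyGetD_natCast, PySem.List.pyGetD_natCast, List.getD_cons_succ]

theorem abody_shift (h x din dout a : Int) (t : List Int) (k : Nat) (hk : k < t.length + 2) :
    abody (h :: x :: t) ((t.length : Int) + 3) din dout a (1 + (k : Int))
      = abody (x :: t) ((t.length : Int) + 2) h dout a (0 + (k : Int)) := by
  have h1 : (1 : Int) + (k : Int) = ((k + 1 : Nat) : Int) := by push_cast; ring
  have h0 : (0 : Int) + (k : Int) = ((k : Nat) : Int) := by push_cast; ring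
  simp only [abody, h1, h0]
  rcases k with _ | k'
  · -- first remaining index: middle branch on the left, i = 0 branch on the right
    rw [if_neg (by omega : ¬ ((0 + 1 : Nat) : Int) = 0),
        if_neg (by omega : ¬ ((0 + 1 : Nat) : Int) = (t.length : Int) + 3 - 1),
        if_pos (by omega : ((0 : Nat) : Int) = 0),
        show ((0 + 1 : Nat) : Int) - 1 = ((0 : Nat) : Int) by omega]
    have e0 : PySem.List.pyGetD (h :: x :: t) ((0 : Nat) : Int) 0 = h := by
      rw [PySem.List.pyGetD_natCast]; rfl
    have e1 : PySem.List.pyGetD (h :: x :: t) ((0 + 1 : Nat) : Int) 0 = x := by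
      rw [PySem.List.pyGetD_natCast]; rfl
    have e2 : PySem.List.pyGetD (x :: t) 0 0 = x := by
      rw [PySem.List.pyGetD_zero]; rfl
    rw [e0, e1, e2]
  · -- later indices: the two remaining branches shift by one
    rw [if_neg (by omega : ¬ ((k' + 1 + 1 : Nat) : Int) = 0),
        if_neg (by omega : ¬ ((k' + 1 : Nat) : Int) = 0),
        show ((k' + 1 + 1 : Nat) : Int) - 1 = ((k' + 1 : Nat) : Int) by omega,
        show ((k' + 1 : Nat) : Int) - 1 = ((k' : Nat) : Int) by omega]
    by_cases hlast : k' = t.length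
    · rw [if_pos (by omega : ((k' + 1 + 1 : Nat) : Int) = (t.length : Int) + 3 - 1),
          if_pos (by omega : ((k' + 1 : Nat) : Int) = (t.length : Int) + 2 - 1),
          show ((k' + 1 : Nat) : Int) = ((k' : Nat) : Int) + 1 by push_cast; ring,
          pyGetD_cons_shift h 0 (x :: t) ((k' : Nat) : Int) (by positivity)]
    · rw [if_neg (by omega : ¬ ((k' + 1 + 1 : Nat) : Int) = (t.length : Int) + 3 - 1),
          if_neg (by omega : ¬ ((k' + 1 : Nat) : Int) = (t.length : Int) + 2 - 1),
          show ((k' + 1 + 1 : Nat) : Int) = ((k' + 1 : Nat) : Int) + 1 by push_cast; ring,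
          pyGetD_cons_shift h 0 (x :: t) ((k' + 1 : Nat) : Int) (by positivity),
          show ((k' + 1 : Nat) : Int) = ((k' : Nat) : Int) + 1 by push_cast; ring,
          pyGetD_cons_shift h 0 (x :: t) ((k' : Nat) : Int) (by positivity)]

theorem foldA (t : List Int) : ∀ (h din dout acc : Int),
    (PySem.List.pyRange 0 ((t.length : Int) + 2) 1).foldl
        (abody (h :: t) ((t.length : Int) + 2) din dout) acc
      = acc + zs (din :: h :: (t ++ [dout])) := by
  induction t with
  | nil =>
    intro h din dout acc
    have hr : PySem.List.pyRange 0 ((([] : List Int).length : Int) + 2) 1 = [0, 1] := by decide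
    rw [hr]
    simp [abody, zs, List.zip]
    ring
  | cons x t' ih =>
    intro h din dout acc
    have hn : ((x :: t').length : Int) + 2 = ((t'.length : Int) + 3) := by simp only [List.length_cons]; push_cast; ring
    rw [hn, PySem.List.pyRange_one_cons (by omega), show (0:Int)+1 = 1 from rfl]
    simp only [List.foldl_cons]
    have hb0 : abody (h :: x :: t') ((t'.length : Int) + 3) din dout acc 0
        = acc + (din * h + h) := by
      simp [abody, PySem.List.pyGetD_zero_cons]
    rw [hb0]
    -- shift the remaining range [1, n) to [0, n-1)
    rw [PySem.List.pyRange_one 1 ((t'.length : Int) + 3)]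
    have hm : (((t'.length : Int) + 3) - 1).toNat = t'.length + 2 := by omega
    rw [hm, List.foldl_map]
    have hcong := PySem.List.foldl_congr_mem
      (l := List.range (t'.length + 2))
      (f := fun a k => abody (h :: x :: t') ((t'.length : Int) + 3) din dout a (1 + (k : Int)))
      (g := fun a k => abody (x :: t') ((t'.length : Int) + 2) h dout a (0 + (k : Int)))
      (init := acc + (din * h + h))
      (by intro a k hkmem; exact abody_shift h x din dout a t' k (List.mem_range.mp hkmem))
    rw [hcong]
    have := ih x h dout (acc + (din * h + h))
    rw [PySem.List.pyRange_one 0 ((t'.length : Int) + 2)] at this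
    have hm2 : (((t'.length : Int) + 2) - 0).toNat = t'.length + 2 := by omega
    rw [hm2, List.foldl_map] at this
    rw [this]
    simp only [List.cons_append, zs_cons]
    ring

-- ===== VERDICT (by name: the statement is the Claim_ definition above) =====
theorem mlp_profiler_spec : Claim_equal_mlp_profiler := by
  intro n_layers dim_in hidden_dims dim_out _ hpre
  obtain ⟨hn, hne⟩ := hpre
  cases hidden_dims with
  | nil => exact absurd rfl hne
  | cons h t =>
    have hn' : n_layers = (t.length : Int) + 2 := by
      rw [hn]; simp only [List.length_cons]; push_cast; ring
    unfold Spec_mlp_profiler mlp_profiler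
    rw [hn', foldA t h dim_in dim_out 0, alt_eq_zs]
    simp
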